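-- pv_equiv track=rewrite | github.com/theo-pannethier/CS_Dev_pendu | graphique/tekinter.py | mot_cache
-- ===== SOURCE A (Python) =====
-- def mot_cache(pMot_final):
--     """programme permettant de dissimuler le mot à trouver
--         Entrée : Mot choisi par la fonction selection_mot str
--         Sortie: Mot dissimuler à trouver en str
--         """
--     Mot_cache= pMot_final[0]
--     lettres_restantes=len(pMot_final)-1
--
--     for i in range (1,len(pMot_final)):
--             if  pMot_final[i] != pMot_final[0]:
--                 Mot_cache= Mot_cache + "_"
--             else:
--                 Mot_cache=Mot_cache + pMot_final[0]
--                 lettres_restantes -= 1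
--     return(Mot_cache,lettres_restantes)
-- ===== SOURCE B (Python) =====
-- def mot_cache(pMot_final):
--     first = pMot_final[0]
--     parts = pMot_final.split(first)
--     masked = first.join("_" * len(p) for p in parts)
--     lettres_restantes = sum(len(p) for p in parts)
--     return (masked, lettres_restantes)
-- ===== Notes on version B (the rewrite author's own statement) =====
-- stated objective: alternative
-- what changed: Instead of A's fused index loop that appends to the mask character by character while decrementing a counter, B splits the word on its first letter, rewrites each fragment as a run of underscores, rejoins the runs with that letter, and takes the total fragment length as the hidden count.
import Mathlib
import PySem

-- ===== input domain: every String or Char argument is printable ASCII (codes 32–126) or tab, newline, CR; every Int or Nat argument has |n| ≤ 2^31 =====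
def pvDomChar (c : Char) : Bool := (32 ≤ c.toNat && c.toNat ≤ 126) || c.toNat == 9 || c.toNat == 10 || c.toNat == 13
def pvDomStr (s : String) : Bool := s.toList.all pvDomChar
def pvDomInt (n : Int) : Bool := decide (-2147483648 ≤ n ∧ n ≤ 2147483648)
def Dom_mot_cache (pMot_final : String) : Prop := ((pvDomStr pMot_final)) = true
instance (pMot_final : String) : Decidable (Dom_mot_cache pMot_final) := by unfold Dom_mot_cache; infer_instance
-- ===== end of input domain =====

-- B splits the word on its first letter, turns each fragment into an underscore run
-- and rejoins; the hidden count is the total fragment length (objective: alternative).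

-- ===== PORT A =====
-- A: takes the first char, then for i in 1..len-1 appends '_' or the first char
-- and decrements the counter on a match.  Empty input raises IndexError (excluded by Pre_).
def mot_cache (pMot_final : String) : String × Int :=
  match pMot_final.toList with
  | [] => ("", 0)  -- Python raises IndexError here; outside Pre_
  | c :: rest =>
    let r := rest.foldl
      (fun (acc : List Char × Int) ch =>
        if ch ≠ c then (acc.1 ++ ['_'], acc.2) else (acc.1 ++ [c], acc.2 - 1))
      ([c], (rest.length : Int))
    (String.ofList r.1, r.2)

-- ===== PORT B =====
def mot_cache_alt (pMot_final : String) : String × Int :=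
  match pMot_final.toList with
  | [] => ("", 0)  -- Python raises IndexError here; outside Pre_
  | first :: _ =>
    let parts := PySem.Chars.splitOn pMot_final.toList [first]
    let masked := PySem.Chars.join [first]
      (parts.map (fun p => List.replicate p.length '_'))
    (String.ofList masked, (parts.map (fun p => (p.length : Int))).sum)

-- ===== PRECONDITION & SPEC =====
-- Pre_ excludes only the empty string, on which A raises IndexError.
def Pre_mot_cache (pMot_final : String) : Prop := pMot_final ≠ ""
instance (pMot_final : String) : Decidable (Pre_mot_cache pMot_final) := by unfold Pre_mot_cache; infer_instance
def pvWitness_mot_cache : String := "abracadabra"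

def Spec_mot_cache (pMot_final : String) (out : String × Int) : Prop := out = mot_cache_alt pMot_final
instance (pMot_final : String) (out : String × Int) : Decidable (Spec_mot_cache pMot_final out) := by unfold Spec_mot_cache; infer_instance

-- ===== CLAIM (what is proved, stated in full; the proofs are below) =====
def Claim_equal_mot_cache : Prop := ∀ (pMot_final : String), Dom_mot_cache pMot_final → Pre_mot_cache pMot_final → Spec_mot_cache pMot_final (mot_cache pMot_final)

-- ===== LEMMAS AND PROOFS =====

-- A's loop, started from accumulator (acc, n), appends the masked image of the
-- remaining characters and subtracts the number of matches.
theorem mot_cache_fold_eq (c : Char) (rest : List Char) (acc : List Char) (n : Int) :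
    rest.foldl
      (fun (acc : List Char × Int) ch =>
        if ch ≠ c then (acc.1 ++ ['_'], acc.2) else (acc.1 ++ [c], acc.2 - 1))
      (acc, n)
    = (acc ++ rest.map (fun ch => if ch = c then ch else '_'), n - (rest.count c : Int)) := by
  induction rest generalizing acc n with
  | nil => simp
  | cons ch rest ih =>
    rw [List.foldl_cons]
    by_cases h : ch ≠ c
    · rw [if_pos h, ih]
      simp [h]
    · have hc : ch = c := not_not.mp h
      rw [if_neg h, ih]
      subst hc
      simp [Prod.ext_iff]
      omega

-- PySem's fuelled splitOn.go on a single-char separator, with enough fuel,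
-- computes Mathlib's List.splitOn (first piece prefixed by cur.reverse, accs.reverse in front).
theorem splitOn_go_eq (c : Char) (fuel : Nat) (l cur : List Char) (accs : List (List Char))
    (hfuel : l.length < fuel) :
    PySem.Chars.splitOn.go [c] fuel l cur accs
    = accs.reverse ++ (cur.reverse ++ (l.splitOn c).headI) :: (l.splitOn c).tail := by
  induction fuel generalizing l cur accs with
  | zero => omega
  | succ fuel ih =>
    cases l with
    | nil =>
      simp [PySem.Chars.splitOn.go, List.splitOn]
    | cons x xs =>
      have hx : [c].isPrefixOf (x :: xs) = (c == x) := by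
        simp [List.isPrefixOf]
      obtain ⟨a, t, hat⟩ : ∃ a t, xs.splitOn c = a :: t := by
        rcases h : xs.splitOn c with _ | ⟨a, t⟩
        · exact absurd h (by simpa [List.splitOn] using List.splitOnP_ne_nil _ xs)
        · exact ⟨a, t, rfl⟩
      by_cases hcx : c = x
      · subst hcx
        rw [show PySem.Chars.splitOn.go [c] (fuel+1) (c :: xs) cur accs
              = PySem.Chars.splitOn.go [c] fuel (List.drop 1 (c :: xs)) [] (cur.reverse :: accs) by
            simp [PySem.Chars.splitOn.go, hx]]
        rw [ih (List.drop 1 (c :: xs)) [] (cur.reverse :: accs)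
            (by simpa using Nat.lt_of_succ_lt_succ hfuel)]
        have hsp : (c :: xs).splitOn c = [] :: xs.splitOn c := by
          simp [List.splitOn, List.splitOnP_cons]
        simp [hsp, hat]
      · rw [show PySem.Chars.splitOn.go [c] (fuel+1) (x :: xs) cur accs
              = PySem.Chars.splitOn.go [c] fuel xs (x :: cur) accs by
            simp [PySem.Chars.splitOn.go, hx, beq_eq_false_iff_ne.mpr hcx]]
        rw [ih xs (x :: cur) accs (by simpa using Nat.lt_of_succ_lt_succ hfuel)]
        have hsp : (x :: xs).splitOn c = (xs.splitOn c).modifyHead (List.cons x) := by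
          simp [List.splitOn, List.splitOnP_cons, beq_eq_false_iff_ne.mpr (Ne.symm hcx)]
        simp [hsp, hat]

-- Bridge: PySem's splitOn on a single-char separator is Mathlib's List.splitOn.
theorem chars_splitOn_single (c : Char) (s : List Char) :
    PySem.Chars.splitOn s [c] = s.splitOn c := by
  rw [PySem.Chars.splitOn, splitOn_go_eq c (s.length + 1) s [] [] (Nat.lt_succ_self _)]
  rcases h : s.splitOn c with _ | ⟨a, t⟩
  · exact absurd h (by simpa [List.splitOn] using List.splitOnP_ne_nil _ s)
  · simp

-- Unfolding step for a two-or-more-piece intercalate.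
theorem intercalate_cc (c : Char) (a b : List Char) (t : List (List Char)) :
    [c].intercalate (a :: b :: t) = a ++ [c] ++ [c].intercalate (b :: t) := by
  simp [List.intercalate, List.intersperse]

-- Rejoining the underscore runs of the fragments with c is the character-wise mask.
theorem mask_splitOn (c : Char) (s : List Char) :
    [c].intercalate ((s.splitOn c).map (fun p => List.replicate p.length '_'))
    = s.map (fun ch => if ch = c then ch else '_') := by
  induction s with
  | nil => simp [List.splitOn, List.intercalate]
  | cons x xs ih =>
    obtain ⟨a, t, hat⟩ : ∃ a t, xs.splitOn c = a :: t := by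
      rcases h : xs.splitOn c with _ | ⟨a, t⟩
      · exact absurd h (by simpa [List.splitOn] using List.splitOnP_ne_nil _ xs)
      · exact ⟨a, t, rfl⟩
    by_cases hcx : c = x
    · subst hcx
      have hsp : (c :: xs).splitOn c = [] :: xs.splitOn c := by
        simp [List.splitOn, List.splitOnP_cons]
      rw [hsp, hat, List.map_cons, List.map_cons, intercalate_cc]
      rw [hat, List.map_cons] at ih
      rw [ih]
      simp
    · have hsp : (x :: xs).splitOn c = (xs.splitOn c).modifyHead (List.cons x) := by
        simp [List.splitOn, List.splitOnP_cons, beq_eq_false_iff_ne.mpr (Ne.symm hcx)]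
      rw [hsp, hat]
      rcases t with _ | ⟨b, t'⟩
      · have ih2 : List.replicate a.length '_' = xs.map (fun ch => if ch = c then ch else '_') := by
          simpa [hat, List.intercalate] using ih
        simp [List.intercalate, List.replicate_succ, ih2, Ne.symm hcx]
      · rw [List.modifyHead, List.map_cons, List.map_cons, List.length_cons,
          List.replicate_succ, intercalate_cc]
        rw [hat, List.map_cons, List.map_cons] at ih
        rw [show ('_' :: List.replicate a.length '_') ++ [c]
              ++ [c].intercalate (List.replicate b.length '_' :: t'.map (fun p => List.replicate p.length '_'))
            = '_' :: (List.replicate a.length '_' ++ [c]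
              ++ [c].intercalate (List.replicate b.length '_' :: t'.map (fun p => List.replicate p.length '_'))) by simp]
        rw [← intercalate_cc, ih]
        simp [Ne.symm hcx]

-- The total fragment length is the number of non-c characters.
theorem sum_splitOn_lengths (c : Char) (s : List Char) :
    (((s.splitOn c).map (fun p => (p.length : Int))).sum)
    = (s.length : Int) - (s.count c : Int) := by
  induction s with
  | nil => simp [List.splitOn]
  | cons x xs ih =>
    obtain ⟨a, t, hat⟩ : ∃ a t, xs.splitOn c = a :: t := by
      rcases h : xs.splitOn c with _ | ⟨a, t⟩
      · exact absurd h (by simpa [List.splitOn] using List.splitOnP_ne_nil _ xs)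
      · exact ⟨a, t, rfl⟩
    by_cases hcx : c = x
    · subst hcx
      have hsp : (c :: xs).splitOn c = [] :: xs.splitOn c := by
        simp [List.splitOn, List.splitOnP_cons]
      rw [hsp, List.map_cons, List.sum_cons, ih]
      simp
    · have hsp : (x :: xs).splitOn c = (xs.splitOn c).modifyHead (List.cons x) := by
        simp [List.splitOn, List.splitOnP_cons, beq_eq_false_iff_ne.mpr (Ne.symm hcx)]
      rw [hsp, hat]
      have ih' := hat ▸ ih
      simp only [List.modifyHead, List.map_cons, List.length_cons, List.sum_cons,
        List.count_cons] at *
      rw [if_neg (by simp [Ne.symm hcx])]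
      push_cast at *
      omega

-- ===== VERDICT (by name: the statement is the Claim_ definition above) =====
theorem mot_cache_spec : Claim_equal_mot_cache := by
  intro s _ _
  unfold Spec_mot_cache mot_cache mot_cache_alt
  cases h : s.toList with
  | nil => rfl
  | cons c rest =>
    dsimp only
    rw [mot_cache_fold_eq, chars_splitOn_single]
    rw [PySem.Chars.join, mask_splitOn c (c :: rest), sum_splitOn_lengths c (c :: rest)]
    rw [Prod.ext_iff]
    constructor
    · simp
    · simp
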